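-- pv_equiv track=rewrite | github.com/skfo763/Problem_Solving | test_job/test5.py | get_comp_array
-- ===== SOURCE A (Python) =====
-- def get_comp_array(compressed):
--     num_arr = []
--     res = []
--     current_number = True
--
--     if compressed[0].isdigit():
--         num_arr.append(compressed[0])
--     else:
--         res.append(compressed[0])
--         current_number = False
--
--     for i in range(1, len(compressed)):
--         if compressed[i].isdigit():
--             num_arr.append(compressed[i])
--             current_number = True
--         else:
--             if current_number:
--                 res.append(''.join(num_arr))
--                 num_arr.clear()
--                 res.append(compressed[i])
--             else:
--                 res.append(compressed[i])
--             current_number = False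
--     return res
-- ===== SOURCE B (Python) =====
-- def get_comp_array(compressed):
--     # Scan maximal runs: a digit run becomes one number token (including a
--     # trailing one, which the original accidentally drops), any other char
--     # is its own token.
--     res = []
--     i, n = 0, len(compressed)
--     while i < n:
--         if compressed[i].isdigit():
--             j = i
--             while j < n and compressed[j].isdigit():
--                 j += 1
--             res.append(compressed[i:j])
--             i = j
--         else:
--             res.append(compressed[i])
--             i += 1
--     return res
-- ===== Notes on version B (the rewrite author's own statement) =====
-- stated objective: simpler
-- what changed: Replaces the char-by-char state machine (pending digit buffer + current_number flag) by a direct scan over maximal runs that slices each digit run out as one token, which also emits the final number token that A silently drops.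
-- intended difference: On strings whose last character is a digit, A never flushes its pending digit buffer and returns the token list without the final number (e.g. 'ab12' -> ['a','b']), while B returns it with the final number token ['a','b','12'], which is the intended parse of a compressed string. — e.g. on get_comp_array("ab12"): A returns ["a", "b"], B returns ["a", "b", "12"]
import Mathlib
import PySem

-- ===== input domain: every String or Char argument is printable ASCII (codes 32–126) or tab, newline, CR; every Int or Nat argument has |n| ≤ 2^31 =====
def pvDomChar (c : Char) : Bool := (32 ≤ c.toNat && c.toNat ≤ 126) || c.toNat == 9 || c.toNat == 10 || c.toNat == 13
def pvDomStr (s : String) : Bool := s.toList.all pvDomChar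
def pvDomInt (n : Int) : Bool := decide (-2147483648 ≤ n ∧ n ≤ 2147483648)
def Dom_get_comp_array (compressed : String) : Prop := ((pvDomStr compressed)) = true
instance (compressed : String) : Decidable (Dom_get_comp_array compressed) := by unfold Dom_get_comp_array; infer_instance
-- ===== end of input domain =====

-- B replaces A's char-by-char state machine (digit buffer + flag) by a scan over maximal
-- runs, and emits the trailing number token that A drops (stated as D_ below); simpler, same cost.

-- ===== PORT A =====
-- loop body of `for i in range(1, len(compressed))`: state (num_arr, res, current_number)
def getCompStep (st : List Char × List String × Bool) (c : Char) : List Char × List String × Bool :=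
  let (num_arr, res, current_number) := st
  if PySem.Chars.isdigit c then
    (num_arr ++ [c], res, true)
  else
    if current_number then
      ([], res ++ [String.mk num_arr, String.mk [c]], false)
    else
      (num_arr, res ++ [String.mk [c]], false)

def getCompList : List Char → List String
  | [] => []          -- Python raises IndexError on compressed[0]; excluded by Pre_
  | c :: rest =>
    let init : List Char × List String × Bool :=
      if PySem.Chars.isdigit c then ([c], [], true) else ([], [String.mk [c]], false)
    (rest.foldl getCompStep init).2.1

def get_comp_array (compressed : String) : List String :=
  getCompList compressed.toList

-- ===== PORT B =====
-- Source B's outer while: each step consumes one maximal digit run (inner while = takeWhile)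
-- or one non-digit character.
def getCompRuns : List Char → List String
  | [] => []
  | c :: rest =>
    if PySem.Chars.isdigit c then
      String.mk ((c :: rest).takeWhile PySem.Chars.isdigit)
        :: getCompRuns ((c :: rest).dropWhile PySem.Chars.isdigit)
    else
      String.mk [c] :: getCompRuns rest
termination_by cs => cs.length
decreasing_by
  · simp only [List.dropWhile_cons, *, if_true]
    exact Nat.lt_succ_of_le (List.length_dropWhile_le _ _)
  · simp

def get_comp_array_alt (compressed : String) : List String :=
  getCompRuns compressed.toList

-- ===== PRECONDITION & SPEC =====
-- Pre_ excludes only the empty string, on which A raises IndexError (compressed[0]).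
def Pre_get_comp_array (compressed : String) : Prop := compressed ≠ ""
instance (compressed : String) : Decidable (Pre_get_comp_array compressed) := by
  unfold Pre_get_comp_array; infer_instance
def pvWitness_get_comp_array : String := "12ab"

-- On strings whose last character is a digit, A never flushes its pending digit buffer and
-- returns the token list without the final number, while B returns it with the final number
-- token, which is the intended parse of a compressed string.
def D_get_comp_array (compressed : String) : Prop :=
  (compressed.toList.getLast?.elim false PySem.Chars.isdigit) = true
instance (compressed : String) : Decidable (D_get_comp_array compressed) := by
  unfold D_get_comp_array; infer_instance

def Spec_get_comp_array (compressed : String) (out : List String) : Prop :=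
  ¬ D_get_comp_array compressed → out = get_comp_array_alt compressed
instance (compressed : String) (out : List String) : Decidable (Spec_get_comp_array compressed out) := by
  unfold Spec_get_comp_array; infer_instance

def pvDiffWitness_get_comp_array : String := "ab12"
def pvDiffWitnessOut_get_comp_array : (List String) × (List String) :=
  (["a", "b"], ["a", "b", "12"])

-- ===== CLAIM (what is proved, stated in full; the proofs are below) =====
def Claim_unchanged_get_comp_array : Prop := ∀ (compressed : String), Dom_get_comp_array compressed → Pre_get_comp_array compressed → Spec_get_comp_array compressed (get_comp_array compressed)
def Claim_changed_get_comp_array : Prop := Dom_get_comp_array (pvDiffWitness_get_comp_array) ∧ Pre_get_comp_array (pvDiffWitness_get_comp_array) ∧ D_get_comp_array (pvDiffWitness_get_comp_array) ∧ get_comp_array (pvDiffWitness_get_comp_array) = pvDiffWitnessOut_get_comp_array.1 ∧ get_comp_array_alt (pvDiffWitness_get_comp_array) = pvDiffWitnessOut_get_comp_array.2 ∧ pvDiffWitnessOut_get_comp_array.1 ≠ pvDiffWitnessOut_get_comp_array.2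
def Claim_exact_get_comp_array : Prop := ∀ (compressed : String), Dom_get_comp_array compressed → Pre_get_comp_array compressed → D_get_comp_array compressed → get_comp_array compressed ≠ get_comp_array_alt compressed

-- ===== LEMMAS AND PROOFS =====

-- A's machine, expressed functionally: pending digit buffer + remaining chars → emitted tokens
-- (the trailing buffer is dropped, exactly as A's loop never flushes it)
def pvEmit : List Char → List Char → List String
  | _, [] => []
  | pending, c :: rest =>
    if PySem.Chars.isdigit c then pvEmit (pending ++ [c]) rest
    else (if pending = [] then [] else [String.mk pending]) ++ String.mk [c] :: pvEmit [] rest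

lemma runsNil : getCompRuns [] = [] := by
  rw [getCompRuns.eq_def]

lemma runsConsF (c : Char) (rest : List Char) (h : PySem.Chars.isdigit c = false) :
    getCompRuns (c :: rest) = String.mk [c] :: getCompRuns rest := by
  rw [getCompRuns.eq_def]; simp [h]

lemma runsConsT (c : Char) (rest : List Char) (h : PySem.Chars.isdigit c = true) :
    getCompRuns (c :: rest) =
      String.mk ((c :: rest).takeWhile PySem.Chars.isdigit)
        :: getCompRuns ((c :: rest).dropWhile PySem.Chars.isdigit) := by
  rw [getCompRuns.eq_def]; simp [h]

lemma pvFoldA (cs : List Char) :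
    (∀ num res, num ≠ [] →
      (cs.foldl getCompStep (num, res, true)).2.1 = res ++ pvEmit num cs)
    ∧ (∀ res, (cs.foldl getCompStep ([], res, false)).2.1 = res ++ pvEmit [] cs) := by
  induction cs with
  | nil => simp [pvEmit]
  | cons c rest ih =>
    constructor
    · intro num res hnum
      by_cases hd : PySem.Chars.isdigit c = true
      · simp only [List.foldl_cons, getCompStep, hd, if_true, pvEmit]
        exact (ih.1 _ _ (by simp))
      · simp only [List.foldl_cons, getCompStep, hd, if_false, if_true, Bool.false_eq_true,
          pvEmit, hnum]
        rw [ih.2]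
        simp
    · intro res
      by_cases hd : PySem.Chars.isdigit c = true
      · simp only [List.foldl_cons, getCompStep, hd, if_true, pvEmit]
        exact (ih.1 [c] _ (by simp))
      · simp only [List.foldl_cons, getCompStep, hd, Bool.false_eq_true, if_false, pvEmit]
        rw [ih.2]
        simp

lemma pvA_eq_emit (cs : List Char) : getCompList cs = pvEmit [] cs := by
  cases cs with
  | nil => simp [getCompList, pvEmit]
  | cons c rest =>
    by_cases hd : PySem.Chars.isdigit c = true
    · simp only [getCompList, hd, if_true, pvEmit]
      exact (pvFoldA rest).1 [c] [] (by simp)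
    · simp only [getCompList, hd, Bool.false_eq_true, if_false, pvEmit]
      rw [(pvFoldA rest).2]
      simp

-- B agrees with A's machine whenever the string does not end in a digit
lemma pvRunsEmit (cs : List Char) :
    ((∀ c, cs.getLast? = some c → PySem.Chars.isdigit c = false) →
      pvEmit [] cs = getCompRuns cs)
    ∧ ((∀ c, cs.getLast? = some c → PySem.Chars.isdigit c = false) →
      ∀ pending, pending ≠ [] → cs ≠ [] →
        pvEmit pending cs =
          String.mk (pending ++ cs.takeWhile PySem.Chars.isdigit)
            :: getCompRuns (cs.dropWhile PySem.Chars.isdigit)) := by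
  induction cs with
  | nil => simp [pvEmit, getCompRuns]
  | cons c rest ih =>
    have hlast : (∀ c', (c :: rest).getLast? = some c' → PySem.Chars.isdigit c' = false) →
        (∀ c', rest.getLast? = some c' → PySem.Chars.isdigit c' = false) := by
      intro h c' hc'
      cases rest with
      | nil => simp at hc'
      | cons b bs => exact h c' (by simpa [List.getLast?_cons_cons] using hc')
    constructor
    · intro h
      by_cases hd : PySem.Chars.isdigit c = true
      · have hrest : rest ≠ [] := by
          intro hr; subst hr
          exact absurd (h c (by simp)) (by simp [hd])
        simp only [pvEmit, hd, if_true, getCompRuns, List.takeWhile_cons, List.dropWhile_cons,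
          List.nil_append]
        exact (ih.2 (hlast h) [c] (by simp) hrest)
      · simp only [pvEmit, hd, Bool.false_eq_true, if_false, getCompRuns, if_true, List.nil_append]
        rw [List.cons_eq_cons]
        refine ⟨rfl, ?_⟩
        exact ih.1 (hlast h)
    · intro h pending hpend _
      by_cases hd : PySem.Chars.isdigit c = true
      · have hrest : rest ≠ [] := by
          intro hr; subst hr
          exact absurd (h c (by simp)) (by simp [hd])
        simp only [pvEmit, hd, if_true, List.takeWhile_cons, List.dropWhile_cons]
        rw [ih.2 (hlast h) (pending ++ [c]) (by simp) hrest]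
        simp
      · simp only [pvEmit, hd, Bool.false_eq_true, if_false, List.takeWhile_cons,
          List.dropWhile_cons, hpend, List.append_nil, List.singleton_append]
        rw [List.cons_eq_cons]
        refine ⟨rfl, ?_⟩
        simp only [getCompRuns, hd, Bool.false_eq_true, if_false]
        rw [List.cons_eq_cons]
        refine ⟨rfl, ?_⟩
        exact ih.1 (hlast h)

-- B = A's machine plus exactly one trailing token when the string ends in a digit
lemma pvRunsEmitDig (cs : List Char) :
    ((∃ c, cs.getLast? = some c ∧ PySem.Chars.isdigit c = true) →
      ∃ t, getCompRuns cs = pvEmit [] cs ++ [t])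
    ∧ (∀ pending, pending ≠ [] →
        (cs = [] ∨ ∃ c, cs.getLast? = some c ∧ PySem.Chars.isdigit c = true) →
        ∃ t, String.mk (pending ++ cs.takeWhile PySem.Chars.isdigit)
              :: getCompRuns (cs.dropWhile PySem.Chars.isdigit)
            = pvEmit pending cs ++ [t]) := by
  induction cs with
  | nil =>
    refine ⟨by simp, ?_⟩
    intro pending hpend _
    exact ⟨String.mk pending, by simp [pvEmit, getCompRuns]⟩
  | cons c rest ih =>
    have hlast : (∃ c', (c :: rest).getLast? = some c' ∧ PySem.Chars.isdigit c' = true) →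
        rest = [] ∨ ∃ c', rest.getLast? = some c' ∧ PySem.Chars.isdigit c' = true := by
      rintro ⟨c', hc', hdc'⟩
      cases rest with
      | nil => exact Or.inl rfl
      | cons b bs =>
        exact Or.inr ⟨c', by simpa [List.getLast?_cons_cons] using hc', hdc'⟩
    constructor
    · intro h
      by_cases hd : PySem.Chars.isdigit c = true
      · obtain ⟨t, ht⟩ := ih.2 [c] (by simp) (hlast h)
        refine ⟨t, ?_⟩
        simp only [getCompRuns, hd, if_true, List.takeWhile_cons, List.dropWhile_cons, pvEmit,
          List.nil_append]
        exact ht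
      · have hrest : ∃ c', rest.getLast? = some c' ∧ PySem.Chars.isdigit c' = true := by
          rcases hlast h with hr | hr
          · subst hr
            obtain ⟨c', hc', hdc'⟩ := h
            simp only [List.getLast?_singleton, Option.some.injEq] at hc'
            exact absurd hdc' (by simp [← hc', hd])
          · exact hr
        obtain ⟨t, ht⟩ := ih.1 hrest
        refine ⟨t, ?_⟩
        simp only [getCompRuns, hd, Bool.false_eq_true, if_false, pvEmit, if_true,
          List.nil_append, ht]
        simp
    · intro pending hpend h
      have h' : ∃ c', (c :: rest).getLast? = some c' ∧ PySem.Chars.isdigit c' = true := by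
        rcases h with h | h
        · exact absurd h (by simp)
        · exact h
      by_cases hd : PySem.Chars.isdigit c = true
      · obtain ⟨t, ht⟩ := ih.2 (pending ++ [c]) (by simp) (hlast h')
        refine ⟨t, ?_⟩
        simp only [List.takeWhile_cons, List.dropWhile_cons, hd, if_true, pvEmit]
        simpa using ht
      · have hrest : ∃ c', rest.getLast? = some c' ∧ PySem.Chars.isdigit c' = true := by
          rcases hlast h' with hr | hr
          · subst hr
            obtain ⟨c', hc', hdc'⟩ := h'
            simp only [List.getLast?_singleton, Option.some.injEq] at hc'
            exact absurd hdc' (by simp [← hc', hd])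
          · exact hr
        obtain ⟨t, ht⟩ := ih.1 hrest
        refine ⟨t, ?_⟩
        have hd' : PySem.Chars.isdigit c = false := by simpa using hd
        have e1 : (c :: rest).takeWhile PySem.Chars.isdigit = [] := by
          simp [hd']
        have e2 : (c :: rest).dropWhile PySem.Chars.isdigit = c :: rest := by
          simp [hd']
        rw [e1, e2, List.append_nil, runsConsF c rest hd', ht]
        simp [pvEmit, hd', hpend]

-- ===== VERDICT (by name: the statement is the Claim_ definition above) =====
theorem get_comp_array_spec : Claim_unchanged_get_comp_array := by
  intro s _ _ hnD
  unfold get_comp_array get_comp_array_alt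
  rw [pvA_eq_emit]
  apply (pvRunsEmit s.toList).1
  intro c hc
  cases hdig : PySem.Chars.isdigit c with
  | false => rfl
  | true => exact absurd (by simp [D_get_comp_array, hc, hdig]) hnD

theorem get_comp_array_changed : Claim_changed_get_comp_array := by
  unfold Claim_changed_get_comp_array
  refine ⟨by decide, by decide, by decide, by decide, ?_, by decide⟩
  show get_comp_array_alt "ab12" = ["a", "b", "12"]
  unfold get_comp_array_alt
  rw [show ("ab12" : String).toList = ['a', 'b', '1', '2'] from rfl]
  rw [runsConsF _ _ (by decide), runsConsF _ _ (by decide), runsConsT _ _ (by decide)]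
  rw [show List.takeWhile PySem.Chars.isdigit ['1', '2'] = ['1', '2'] from by decide]
  rw [show List.dropWhile PySem.Chars.isdigit ['1', '2'] = [] from by decide]
  rw [runsNil]
  decide

theorem get_comp_array_tight : Claim_exact_get_comp_array := by
  intro s _ _ hD heq
  unfold D_get_comp_array at hD
  have hlast : ∃ c, s.toList.getLast? = some c ∧ PySem.Chars.isdigit c = true := by
    cases hc : s.toList.getLast? with
    | none => simp [hc] at hD
    | some c => exact ⟨c, rfl, by simpa [hc] using hD⟩
  obtain ⟨t, ht⟩ := (pvRunsEmitDig s.toList).1 hlast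
  have : getCompList s.toList = getCompRuns s.toList := heq
  rw [pvA_eq_emit, ht] at this
  have := congrArg List.length this
  simp at this
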